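-- pv_equiv track=rewrite | github.com/stephanbalthasar/b2-eucapml | mentor/engines/router.py | _summarize_signals
-- ===== SOURCE A (Python) =====
-- from typing import Dict, Any, List
--
-- def _summarize_signals(signals: List[Dict[str, Any]]) -> Dict[str, int]:
--     """
--     Build type-aware counts. We intentionally exclude 'other' from 'effective' decisions.
--     Also dedupe per (type, canonical) to avoid double-counting.
--     """
--     counts = {
--         "concepts": 0,
--         "cases": 0,          # case_name
--         "case_numbers": 0,   # case_no
--         "articles": 0,
--         "sections": 0,
--         "other": 0,
--     }
--     seen_keys = set()
--
--     for s in signals: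
--         typ = (s.get("type") or "").lower()
--         can = (s.get("canonical") or "").lower()
--         key = (typ, can)
--         if key in seen_keys:
--             continue
--         seen_keys.add(key)
--
--         if typ == "concept":
--             counts["concepts"] += 1
--         elif typ == "case_name":
--             counts["cases"] += 1
--         elif typ == "case_no":
--             counts["case_numbers"] += 1
--         elif typ == "article":
--             counts["articles"] += 1
--         elif typ == "section":
--             counts["sections"] += 1
--         else:
--             counts["other"] += 1
--
--     counts["effective"] = (
--         counts["concepts"]
--         + counts["cases"]
--         + counts["case_numbers"]
--         + counts["articles"]
--         + counts["sections"]
--     )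
--     return counts
-- ===== SOURCE B (Python) =====
-- from typing import Dict, Any, List
--
-- _LABEL = {
--     "concept": "concepts",
--     "case_name": "cases",
--     "case_no": "case_numbers",
--     "article": "articles",
--     "section": "sections",
-- }
--
-- def _summarize_signals(signals: List[Dict[str, Any]]) -> Dict[str, int]:
--     # Recursive decomposition, no seen-set: take the first signal's key, drop every
--     # later signal with the same key, recurse on the rest, then bump the category
--     # chosen by a label table instead of a branch chain.
--     def key(s):
--         return ((s.get("type") or "").lower(), (s.get("canonical") or "").lower())
--
--     def go(sigs):
--         if not sigs:
--             return {"concepts": 0, "cases": 0, "case_numbers": 0,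
--                     "articles": 0, "sections": 0, "other": 0}
--         k = key(sigs[0])
--         counts = go([s for s in sigs[1:] if key(s) != k])
--         counts[_LABEL.get(k[0], "other")] += 1
--         return counts
--
--     counts = go(signals)
--     counts["effective"] = (counts["concepts"] + counts["cases"]
--                            + counts["case_numbers"] + counts["articles"]
--                            + counts["sections"])
--     return counts
-- ===== Notes on version B (the rewrite author's own statement) =====
-- stated objective: alternative
-- what changed: Replaces the single pass with a mutable counts dict plus a seen-set and a five-way branch chain by a recursive decomposition with no set at all: take the head signal's key, filter every later signal with the same key out of the tail, recurse, then bump the bucket chosen by a static label table; 'effective' is summed at the end as in A.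
import Mathlib
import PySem

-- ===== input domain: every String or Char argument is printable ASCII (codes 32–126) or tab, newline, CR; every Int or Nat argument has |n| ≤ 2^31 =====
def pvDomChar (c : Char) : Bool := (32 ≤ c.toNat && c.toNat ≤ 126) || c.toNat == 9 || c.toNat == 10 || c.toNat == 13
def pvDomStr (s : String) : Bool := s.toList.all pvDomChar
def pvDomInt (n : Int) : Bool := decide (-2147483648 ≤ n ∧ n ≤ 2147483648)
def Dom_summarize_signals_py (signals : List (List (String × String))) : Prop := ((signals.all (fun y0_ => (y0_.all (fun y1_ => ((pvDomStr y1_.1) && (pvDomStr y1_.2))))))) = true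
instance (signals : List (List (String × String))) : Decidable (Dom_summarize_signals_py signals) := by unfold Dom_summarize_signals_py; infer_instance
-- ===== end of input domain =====

-- B replaces A's seen-set + mutable-counts single pass by a recursive decomposition (head key,
-- filter duplicates out of the tail, recurse, bump the bucket from a label table) — objective: alternative.


-- ===== PORT A =====
def summarize_signals_py (signals : List (List (String × String))) : List (String × Int) :=
  let counts0 : PySem.Dict String Int := PySem.Dict.mk
    [("concepts", 0), ("cases", 0), ("case_numbers", 0), ("articles", 0), ("sections", 0), ("other", 0)]
  let st := signals.foldl
    (fun (st : PySem.Dict String Int × PySem.Set (String × String)) s =>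
      let typ := PySem.Str.lower (((PySem.Dict.mk s).get? "type").getD "")
      let can := PySem.Str.lower (((PySem.Dict.mk s).get? "canonical").getD "")
      let key := (typ, can)
      if PySem.Set.contains st.2 key then st
      else
        let seen := PySem.Set.add st.2 key
        let counts :=
          if typ = "concept" then st.1.modify "concepts" 0 (· + 1)
          else if typ = "case_name" then st.1.modify "cases" 0 (· + 1)
          else if typ = "case_no" then st.1.modify "case_numbers" 0 (· + 1)
          else if typ = "article" then st.1.modify "articles" 0 (· + 1)
          else if typ = "section" then st.1.modify "sections" 0 (· + 1)
          else st.1.modify "other" 0 (· + 1)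
        (counts, seen))
    (counts0, PySem.Set.empty)
  let counts := st.1
  let eff := counts.getD "concepts" 0 + counts.getD "cases" 0 + counts.getD "case_numbers" 0
           + counts.getD "articles" 0 + counts.getD "sections" 0
  (counts.insert "effective" eff).items

-- ===== PORT B =====
-- key(s) of B
def pvKey (s : List (String × String)) : String × String :=
  (PySem.Str.lower (((PySem.Dict.mk s).get? "type").getD ""),
   PySem.Str.lower (((PySem.Dict.mk s).get? "canonical").getD ""))

-- B's _LABEL table
def pvLabel : PySem.Dict String String := PySem.Dict.mk
  [("concept", "concepts"), ("case_name", "cases"), ("case_no", "case_numbers"),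
   ("article", "articles"), ("section", "sections")]

-- B's recursive go: head key, filter same-key signals out of the tail, recurse, bump one bucket
def pvGo (sigs : List (List (String × String))) : PySem.Dict String Int :=
  match sigs with
  | [] => PySem.Dict.mk
      [("concepts", 0), ("cases", 0), ("case_numbers", 0), ("articles", 0), ("sections", 0), ("other", 0)]
  | s :: rest =>
    let k := pvKey s
    let counts := pvGo (rest.filter (fun s' => pvKey s' != k))
    counts.modify (pvLabel.getD k.1 "other") 0 (· + 1)
termination_by sigs.length
decreasing_by simpa using Nat.lt_succ_of_le (List.length_filter_le _ _)

def summarize_signals_py_alt (signals : List (List (String × String))) : List (String × Int) :=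
  let counts := pvGo signals
  -- counts["x"] never raises: all six keys are present; getD 0 is exact here
  let eff := counts.getD "concepts" 0 + counts.getD "cases" 0 + counts.getD "case_numbers" 0
           + counts.getD "articles" 0 + counts.getD "sections" 0
  (counts.insert "effective" eff).items

-- ===== PRECONDITION & SPEC =====
def Spec_summarize_signals_py (signals : List (List (String × String))) (out : List (String × Int)) : Prop := out = summarize_signals_py_alt signals
instance (signals : List (List (String × String))) (out : List (String × Int)) : Decidable (Spec_summarize_signals_py signals out) := by unfold Spec_summarize_signals_py; infer_instance

-- ===== CLAIM (what is proved, stated in full; the proofs are below) =====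
def Claim_equal_summarize_signals_py : Prop := ∀ (signals : List (List (String × String))), Dom_summarize_signals_py signals → Spec_summarize_signals_py signals (summarize_signals_py signals)

-- ===== LEMMAS AND PROOFS =====
-- A's counts dict, characterised as counts over a list of deduplicated keys.
def pvTable (seen : List (String × String)) : PySem.Dict String Int :=
  PySem.Dict.mk
    [("concepts", ((seen.map Prod.fst).count "concept" : Int)),
     ("cases", ((seen.map Prod.fst).count "case_name" : Int)),
     ("case_numbers", ((seen.map Prod.fst).count "case_no" : Int)),
     ("articles", ((seen.map Prod.fst).count "article" : Int)),
     ("sections", ((seen.map Prod.fst).count "section" : Int)),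
     ("other", (seen.length : Int) -
        (((seen.map Prod.fst).count "concept" : Int) + ((seen.map Prod.fst).count "case_name" : Int)
         + ((seen.map Prod.fst).count "case_no" : Int) + ((seen.map Prod.fst).count "article" : Int)
         + ((seen.map Prod.fst).count "section" : Int)))]

-- The dedup list B's recursion walks: first occurrences of the keys, in order.
def pvDk (sigs : List (List (String × String))) : List (String × String) :=
  match sigs with
  | [] => []
  | s :: rest => pvKey s :: pvDk (rest.filter (fun s' => pvKey s' != pvKey s))
termination_by sigs.length
decreasing_by simpa using Nat.lt_succ_of_le (List.length_filter_le _ _)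

lemma pvDk_cons (s : List (String × String)) (rest : List (List (String × String))) :
    pvDk (s :: rest) = pvKey s :: pvDk (rest.filter (fun s' => pvKey s' != pvKey s)) := by
  rw [pvDk]

lemma mem_pvDk_fuel : ∀ (n : Nat) (sigs : List (List (String × String))), sigs.length ≤ n →
    ∀ k, (k ∈ pvDk sigs ↔ k ∈ sigs.map pvKey)
  | _, [], _, k => by simp [pvDk]
  | 0, s :: rest, h, k => by simp at h
  | n+1, s :: rest, h, k => by
      rw [pvDk_cons]
      have hlen : (rest.filter (fun s' => pvKey s' != pvKey s)).length ≤ n :=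
        le_trans (List.length_filter_le _ _) (by simpa using h)
      simp only [List.mem_cons, mem_pvDk_fuel n _ hlen k, List.mem_map, List.mem_filter,
        List.map_cons]
      constructor
      · rintro (rfl | ⟨a, ⟨ha, _⟩, rfl⟩)
        · exact Or.inl rfl
        · exact Or.inr ⟨a, ha, rfl⟩
      · rintro (rfl | ⟨a, ha, rfl⟩)
        · exact Or.inl rfl
        · by_cases hk : pvKey a = pvKey s
          · exact Or.inl hk
          · exact Or.inr ⟨a, ⟨ha, by simp [hk]⟩, rfl⟩

lemma mem_pvDk (k : String × String) (sigs : List (List (String × String))) :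
    k ∈ pvDk sigs ↔ k ∈ sigs.map pvKey :=
  mem_pvDk_fuel sigs.length sigs le_rfl k

lemma nodup_pvDk_fuel : ∀ (n : Nat) (sigs : List (List (String × String))), sigs.length ≤ n →
    (pvDk sigs).Nodup
  | _, [], _ => by simp [pvDk]
  | 0, s :: rest, h => by simp at h
  | n+1, s :: rest, h => by
      rw [pvDk_cons]
      have hlen : (rest.filter (fun s' => pvKey s' != pvKey s)).length ≤ n :=
        le_trans (List.length_filter_le _ _) (by simpa using h)
      refine List.nodup_cons.2 ⟨?_, nodup_pvDk_fuel n _ hlen⟩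
      intro hmem
      rcases List.mem_map.1 ((mem_pvDk _ _).1 hmem) with ⟨a, ha, hk⟩
      rcases List.mem_filter.1 ha with ⟨_, hne⟩
      simp [hk] at hne

lemma nodup_pvDk (sigs : List (List (String × String))) : (pvDk sigs).Nodup :=
  nodup_pvDk_fuel sigs.length sigs le_rfl

-- the table only depends on the multiset of keys
lemma pvTable_perm {D1 D2 : List (String × String)} (h : D1.Perm D2) : pvTable D1 = pvTable D2 := by
  simp [pvTable, h.length_eq, (h.map Prod.fst).count_eq]

-- the label-table lookup selects the same bucket as A's branch chain
lemma label_select (t : String) (d : PySem.Dict String Int) :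
    d.modify (pvLabel.getD t "other") 0 (· + 1) =
      (if t = "concept" then d.modify "concepts" 0 (· + 1)
       else if t = "case_name" then d.modify "cases" 0 (· + 1)
       else if t = "case_no" then d.modify "case_numbers" 0 (· + 1)
       else if t = "article" then d.modify "articles" 0 (· + 1)
       else if t = "section" then d.modify "sections" 0 (· + 1)
       else d.modify "other" 0 (· + 1)) := by
  split_ifs with h1 h2 h3 h4 h5
  · simp [h1, pvLabel, PySem.Dict.getD, PySem.Dict.get?]
  · simp [h2, pvLabel, PySem.Dict.getD, PySem.Dict.get?]
  · simp [h3, pvLabel, PySem.Dict.getD, PySem.Dict.get?]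
  · simp [h4, pvLabel, PySem.Dict.getD, PySem.Dict.get?]
  · simp [h5, pvLabel, PySem.Dict.getD, PySem.Dict.get?]
  · have hn : pvLabel.getD t "other" = "other" := by
      simp [pvLabel, PySem.Dict.getD, PySem.Dict.get?, List.find?,
        beq_eq_false_iff_ne.2 (Ne.symm h1), beq_eq_false_iff_ne.2 (Ne.symm h2),
        beq_eq_false_iff_ne.2 (Ne.symm h3), beq_eq_false_iff_ne.2 (Ne.symm h4),
        beq_eq_false_iff_ne.2 (Ne.symm h5)]
    rw [hn]

-- one step of A's loop, with the table invariant
lemma step_core (seen : PySem.Set (String × String)) (typ can : String) :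
    (if PySem.Set.contains seen (typ, can) then (pvTable seen, seen)
     else
       ((if typ = "concept" then (pvTable seen).modify "concepts" 0 (· + 1)
         else if typ = "case_name" then (pvTable seen).modify "cases" 0 (· + 1)
         else if typ = "case_no" then (pvTable seen).modify "case_numbers" 0 (· + 1)
         else if typ = "article" then (pvTable seen).modify "articles" 0 (· + 1)
         else if typ = "section" then (pvTable seen).modify "sections" 0 (· + 1)
         else (pvTable seen).modify "other" 0 (· + 1)),
        PySem.Set.add seen (typ, can)))
    = (pvTable (PySem.Set.add seen (typ, can)), PySem.Set.add seen (typ, can)) := by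
  by_cases hm : (typ, can) ∈ seen
  · simp [PySem.Set.add, PySem.Set.contains, hm]
  · have hc : PySem.Set.contains seen (typ, can) = false := by
      simp [PySem.Set.contains, hm]
    have hadd : PySem.Set.add seen (typ, can) = seen ++ [(typ, can)] := by
      simp [PySem.Set.add, PySem.Set.contains, hm]
    rw [hc, hadd]
    simp only [Bool.false_eq_true, if_false, Prod.mk.injEq, and_true]
    split_ifs with h1 h2 h3 h4 h5 <;>
      simp_all [pvTable, PySem.Dict.modify, PySem.Dict.insert, PySem.Dict.getD, PySem.Dict.get?,
        List.count_append, beq_iff_eq] <;>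
      omega

lemma loop_eq (signals : List (List (String × String))) (seen : PySem.Set (String × String)) :
    signals.foldl
      (fun (st : PySem.Dict String Int × PySem.Set (String × String)) s =>
        let typ := PySem.Str.lower (((PySem.Dict.mk s).get? "type").getD "")
        let can := PySem.Str.lower (((PySem.Dict.mk s).get? "canonical").getD "")
        let key := (typ, can)
        if PySem.Set.contains st.2 key then st
        else
          let seen := PySem.Set.add st.2 key
          let counts :=
            if typ = "concept" then st.1.modify "concepts" 0 (· + 1)
            else if typ = "case_name" then st.1.modify "cases" 0 (· + 1)
            else if typ = "case_no" then st.1.modify "case_numbers" 0 (· + 1)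
            else if typ = "article" then st.1.modify "articles" 0 (· + 1)
            else if typ = "section" then st.1.modify "sections" 0 (· + 1)
            else st.1.modify "other" 0 (· + 1)
          (counts, seen))
      (pvTable seen, seen)
    = (pvTable (signals.foldl (fun d s => PySem.Set.add d (pvKey s)) seen),
       signals.foldl (fun d s => PySem.Set.add d (pvKey s)) seen) := by
  induction signals generalizing seen with
  | nil => rfl
  | cons s rest ih =>
    simp only [List.foldl_cons]
    rw [show
      (let typ := PySem.Str.lower (((PySem.Dict.mk s).get? "type").getD "")
       let can := PySem.Str.lower (((PySem.Dict.mk s).get? "canonical").getD "")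
       let key := (typ, can)
       if PySem.Set.contains seen key then (pvTable seen, seen)
       else
         let seen' := PySem.Set.add seen key
         let counts :=
           if typ = "concept" then (pvTable seen).modify "concepts" 0 (· + 1)
           else if typ = "case_name" then (pvTable seen).modify "cases" 0 (· + 1)
           else if typ = "case_no" then (pvTable seen).modify "case_numbers" 0 (· + 1)
           else if typ = "article" then (pvTable seen).modify "articles" 0 (· + 1)
           else if typ = "section" then (pvTable seen).modify "sections" 0 (· + 1)
           else (pvTable seen).modify "other" 0 (· + 1)
         (counts, seen'))
      = (pvTable (PySem.Set.add seen (pvKey s)), PySem.Set.add seen (pvKey s))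
      from step_core seen (pvKey s).1 (pvKey s).2]
    exact ih (PySem.Set.add seen (pvKey s))

-- bumping the table bucket of a fresh key = consing the key onto the table's list
lemma bump_eq (t c : String) (D : List (String × String)) (hm : (t, c) ∉ D) :
    (pvTable D).modify (pvLabel.getD t "other") 0 (· + 1) = pvTable ((t, c) :: D) := by
  rw [label_select]
  have h := congrArg Prod.fst (step_core D t c)
  have hc : PySem.Set.contains D (t, c) = false := by simp [PySem.Set.contains, hm]
  have hadd : PySem.Set.add D (t, c) = D ++ [(t, c)] := by
    simp [PySem.Set.add, PySem.Set.contains, hm]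
  rw [hc] at h
  simp only [Bool.false_eq_true, if_false] at h
  rw [h, hadd, pvTable_perm (List.perm_append_singleton _ _)]

lemma pvGo_eq_fuel : ∀ (n : Nat) (sigs : List (List (String × String))), sigs.length ≤ n →
    pvGo sigs = pvTable (pvDk sigs)
  | _, [], _ => by rw [pvGo, pvDk]; rfl
  | 0, s :: rest, h => by simp at h
  | n+1, s :: rest, h => by
      rw [pvGo, pvDk_cons]
      have hlen : (rest.filter (fun s' => pvKey s' != pvKey s)).length ≤ n :=
        le_trans (List.length_filter_le _ _) (by simpa using h)
      show (pvGo (rest.filter (fun s' => pvKey s' != pvKey s))).modify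
          (pvLabel.getD (pvKey s).1 "other") 0 (· + 1)
        = pvTable (pvKey s :: pvDk (rest.filter (fun s' => pvKey s' != pvKey s)))
      rw [pvGo_eq_fuel n _ hlen]
      refine bump_eq (pvKey s).1 (pvKey s).2 _ ?_
      intro hmem
      rcases List.mem_map.1 ((mem_pvDk _ _).1 hmem) with ⟨a, ha, hk⟩
      rcases List.mem_filter.1 ha with ⟨_, hne⟩
      simp [hk] at hne

lemma pvGo_eq (sigs : List (List (String × String))) : pvGo sigs = pvTable (pvDk sigs) :=
  pvGo_eq_fuel sigs.length sigs le_rfl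

-- A's seen-set and B's dedup list are permutations of each other
lemma sets_perm (signals : List (List (String × String))) :
    (signals.foldl (fun d s => PySem.Set.add d (pvKey s)) ([] : PySem.Set (String × String))).Perm
      (pvDk signals) := by
  have hfold : signals.foldl (fun d s => PySem.Set.add d (pvKey s)) ([] : PySem.Set (String × String))
      = PySem.Set.ofList (signals.map pvKey) := by
    rw [PySem.Set.ofList_eq_foldl, List.foldl_map]
  rw [hfold]
  refine (List.perm_ext_iff_of_nodup (PySem.Set.nodup_ofList _) (nodup_pvDk signals)).2 ?_
  intro a
  rw [PySem.Set.mem_ofList, mem_pvDk]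

-- ===== VERDICT (by name: the statement is the Claim_ definition above) =====
theorem summarize_signals_py_spec : Claim_equal_summarize_signals_py := by
  intro signals _
  unfold Spec_summarize_signals_py summarize_signals_py summarize_signals_py_alt
  simp only []
  rw [show (PySem.Dict.mk
      [("concepts", (0:Int)), ("cases", 0), ("case_numbers", 0), ("articles", 0), ("sections", 0), ("other", 0)])
      = pvTable [] from by decide]
  rw [show (PySem.Set.empty : PySem.Set (String × String)) = ([] : PySem.Set (String × String)) from rfl]
  rw [loop_eq, pvGo_eq, pvTable_perm (sets_perm signals)]
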